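-- pv_equiv track=rewrite | github.com/7Bcoding/LeetCode-solutions-python | 动态规划/双周赛5458-NumSplits-字符串的好分割数目-mid.py | numSplits
-- ===== SOURCE A (Python) =====
-- def numSplits(s):
--     """
--     :type s: str
--     :rtype: int
--     """
--     # 解法：动态规划
--     # dp[i]表示的是前i个字符中不同的字符数
--     # 以i为分隔，S(0,i)为左边的字符，S(i+1,n)为右边的字符，那么很容易得到状态方程：
--     # 当加入第i个字符时——
--     # 若第i个字符在前i-1个字符中，则dp[i]保持不变          --- dp[i] = dp[i-1]
--     # 若第i个字符不在前i-1个字符中，则加入了一个新的不同字符 --- dp[i] = dp[i-1] + 1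
--     # S(0,i)中每加入一个不同的字符，S(i+1,n)就要少一个不同的字符。dp[0]时dp[0]=1，而
--     # 右半部分S(1,n)总的不同字符数初始化为nums，nums即为整个字符串总的不同字符数，用set统计
--
--     dp = [1] * len(s)
--     nums = len(set(s))
--     if s[0] not in s[1:]: nums -= 1
--     dp[0] = 1
--     count = 1 if nums == 1 else 0
--     for i in range(1, len(s)-1):
--         if s[i] in s[0:i]:
--             dp[i] = dp[i-1]
--         else:
--             dp[i] = dp[i-1] + 1
--         if s[i] not in s[i+1:]:
--             nums -= 1
--         if nums == dp[i]:
--             count += 1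
--     return count
-- ===== SOURCE B (Python) =====
-- def numSplits(s):
--     n = len(s)
--     suf = [0] * (n + 1)
--     seen = set()
--     for i in range(n - 1, -1, -1):
--         seen.add(s[i])
--         suf[i] = len(seen)
--     seen = set()
--     count = 0
--     for i in range(n - 1):
--         seen.add(s[i])
--         if len(seen) == suf[i + 1]:
--             count += 1
--     return count
-- ===== Notes on version B (the rewrite author's own statement) =====
-- stated objective: faster
-- what changed: Replaced A's per-index substring membership scans (s[i] in s[0:i], s[i] in s[i+1:]) and dp array with a two-pass algorithm: one backward pass building a suffix distinct-count array with a set, one forward pass growing a prefix set and comparing counts.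
import Mathlib
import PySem

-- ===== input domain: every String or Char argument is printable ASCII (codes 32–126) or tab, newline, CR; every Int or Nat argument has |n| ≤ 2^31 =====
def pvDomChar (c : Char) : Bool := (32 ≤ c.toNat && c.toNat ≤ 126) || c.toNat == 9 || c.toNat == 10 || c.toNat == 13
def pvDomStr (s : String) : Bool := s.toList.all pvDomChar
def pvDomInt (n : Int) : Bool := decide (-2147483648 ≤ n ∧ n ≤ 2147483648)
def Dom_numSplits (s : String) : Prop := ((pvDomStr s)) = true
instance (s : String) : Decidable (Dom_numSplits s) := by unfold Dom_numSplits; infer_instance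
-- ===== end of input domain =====

-- B replaces A's quadratic per-split substring scans by two linear set passes (a suffix distinct-count array, then a growing prefix set); equivalence is proved on non-empty strings (A raises IndexError on "").

-- ===== PORT A =====
-- body of A's for-loop over i in range(1, len(s)-1); the single-char 'in' substring tests become .contains
def stepA (l : List Char) (st : List Int × Int × Int) (i : Int) : List Int × Int × Int :=
  let ci := PySem.List.pyGetD l i ' '
  let dpi : Int :=
    if (PySem.List.slice l (some 0) (some i)).contains ci then
      PySem.List.pyGetD st.1 (i - 1) 0
    else
      PySem.List.pyGetD st.1 (i - 1) 0 + 1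
  let dp' := PySem.List.pySetD st.1 i dpi
  let nums' : Int := if ¬ (PySem.List.slice l (some (i + 1)) none).contains ci then st.2.1 - 1 else st.2.1
  (dp', nums', if nums' = dpi then st.2.2 + 1 else st.2.2)

-- A's state before the loop: dp = [1]*len(s) with dp[0] = 1; nums = len(set(s)) adjusted for s[0]; count
def initA (l : List Char) : List Int × Int × Int :=
  let nums0 : Int := (PySem.Set.ofList l).length
  let nums1 : Int :=
    if (PySem.List.slice l (some 1) none).contains (PySem.List.pyGetD l 0 ' ') then nums0 else nums0 - 1
  (PySem.List.pySetD (List.replicate l.length (1 : Int)) 0 1, nums1, if nums1 = 1 then 1 else 0)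

def numSplits (s : String) : Int :=
  let l := s.toList
  ((PySem.List.pyRange 1 ((l.length : Int) - 1) 1).foldl (stepA l) (initA l)).2.2

-- ===== PORT B =====
-- body of B's backward loop: seen.add(s[i]); suf[i] = len(seen)
def stepBk (l : List Char) (st : PySem.Set Char × List Int) (i : Int) : PySem.Set Char × List Int :=
  let seen := PySem.Set.add st.1 (PySem.List.pyGetD l i ' ')
  (seen, PySem.List.pySetD st.2 i ((seen.length : Int)))

-- body of B's forward loop: seen.add(s[i]); compare len(seen) with suf[i+1]
def stepFw (l : List Char) (suf : List Int) (st : PySem.Set Char × Int) (i : Int) : PySem.Set Char × Int :=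
  let seen := PySem.Set.add st.1 (PySem.List.pyGetD l i ' ')
  (seen, if (seen.length : Int) = PySem.List.pyGetD suf (i + 1) 0 then st.2 + 1 else st.2)

def numSplits_alt (s : String) : Int :=
  let l := s.toList
  let n : Int := l.length
  let suf := ((PySem.List.pyRange (n - 1) (-1) (-1)).foldl (stepBk l)
      (PySem.Set.empty, List.replicate (l.length + 1) (0 : Int))).2
  ((PySem.List.pyRange 0 (n - 1) 1).foldl (stepFw l suf) (PySem.Set.empty, 0)).2

-- ===== PRECONDITION & SPEC =====
-- Pre_ excludes only the empty string, on which A raises IndexError at s[0].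
def Pre_numSplits (s : String) : Prop := s.toList ≠ []
instance (s : String) : Decidable (Pre_numSplits s) := by unfold Pre_numSplits; infer_instance
def pvWitness_numSplits : String := "aacaba"

def Spec_numSplits (s : String) (out : Int) : Prop := out = numSplits_alt s
instance (s : String) (out : Int) : Decidable (Spec_numSplits s out) := by unfold Spec_numSplits; infer_instance

-- ===== CLAIM (what is proved, stated in full; the proofs are below) =====
def Claim_equal_numSplits : Prop := ∀ (s : String), Dom_numSplits s → Pre_numSplits s → Spec_numSplits s (numSplits s)

-- ===== LEMMAS AND PROOFS =====

-- the common spec: number of distinct characters in a prefix / suffix, and the split predicate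
def preC (l : List Char) (m : ℕ) : ℕ := (l.take m).toFinset.card
def sufC (l : List Char) (m : ℕ) : ℕ := (l.drop m).toFinset.card
def goodP (l : List Char) (j : ℕ) : Bool := preC l (j + 1) == sufC l (j + 1)

theorem contains_iff (xs : List Char) (c : Char) : xs.contains c = true ↔ c ∈ xs := by
  simp

theorem card_ofList (xs : List Char) : (PySem.Set.ofList xs).length = xs.toFinset.card := by
  have h : (PySem.Set.ofList xs).toFinset = xs.toFinset := by
    ext c; simp [PySem.Set.mem_ofList]
  rw [← h]
  exact (List.toFinset_card_of_nodup (PySem.Set.nodup_ofList xs)).symm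

theorem ofList_concat (xs : List Char) (x : Char) :
    PySem.Set.ofList (xs ++ [x]) = PySem.Set.add (PySem.Set.ofList xs) x := by
  simp [PySem.Set.ofList_eq_foldl]

theorem card_concat (xs : List Char) (x : Char) :
    (xs ++ [x]).toFinset.card = if x ∈ xs then xs.toFinset.card else xs.toFinset.card + 1 := by
  have he : (xs ++ [x]).toFinset = insert x xs.toFinset := by
    ext c; simp [or_comm]
  rw [he]
  by_cases h : x ∈ xs
  · simp [h, Finset.insert_eq_self.mpr (List.mem_toFinset.mpr h)]
  · rw [Finset.card_insert_of_notMem (by simp [h])]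
    simp [h]

theorem card_cons (x : Char) (xs : List Char) :
    (x :: xs).toFinset.card = if x ∈ xs then xs.toFinset.card else xs.toFinset.card + 1 := by
  rw [List.toFinset_cons]
  by_cases h : x ∈ xs
  · simp [h, Finset.insert_eq_self.mpr (List.mem_toFinset.mpr h)]
  · rw [Finset.card_insert_of_notMem (by simp [h])]
    simp [h]

theorem preC_succ (l : List Char) (k : ℕ) (hk : k < l.length) :
    preC l (k + 1) = if l[k] ∈ l.take k then preC l k else preC l k + 1 := by
  unfold preC
  rw [List.take_succ_eq_append_getElem hk, card_concat]

theorem sufC_at (l : List Char) (k : ℕ) (hk : k < l.length) :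
    sufC l k = if l[k] ∈ l.drop (k + 1) then sufC l (k + 1) else sufC l (k + 1) + 1 := by
  unfold sufC
  rw [List.drop_eq_getElem_cons hk, card_cons]

theorem preC_one (l : List Char) (hl : l ≠ []) : preC l 1 = 1 := by
  have h0 : 0 < l.length := List.length_pos_iff.mpr hl
  unfold preC
  rw [show (1 : ℕ) = 0 + 1 from rfl, List.take_succ_eq_append_getElem h0]
  simp

theorem sufC_len (l : List Char) : sufC l l.length = 0 := by
  simp [sufC]

theorem ofList_reverse_drop (l : List Char) (k : ℕ) (hk : k < l.length) :
    PySem.Set.ofList ((l.drop k).reverse)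
      = PySem.Set.add (PySem.Set.ofList ((l.drop (k + 1)).reverse)) l[k] := by
  rw [List.drop_eq_getElem_cons hk, List.reverse_cons, ofList_concat]

theorem map_getD_range_self (xs : List Int) :
    (List.range xs.length).map (fun j => xs.getD j 0) = xs := by
  apply List.ext_getElem
  · simp
  · intro i h1 h2
    simp [List.getD_eq_getElem?_getD, List.getElem?_eq_getElem h2]

-- the counting step shared by both loops (A compares nums = dp[i], B compares len(seen) = suf[i+1])
theorem count_stepA (l : List Char) (k : ℕ) :
    (if ((sufC l (k + 1) : ℕ) : ℤ) = ((preC l (k + 1) : ℕ) : ℤ)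
      then ((List.range k).countP (goodP l) : ℤ) + 1 else ((List.range k).countP (goodP l) : ℤ))
    = ((List.range (k + 1)).countP (goodP l) : ℤ) := by
  rw [List.range_succ, List.countP_append]
  by_cases hg : preC l (k + 1) = sufC l (k + 1)
  · rw [if_pos (by exact_mod_cast hg.symm)]
    simp [List.countP_cons, goodP, hg]
  · rw [if_neg (by intro hcon; exact hg (by exact_mod_cast hcon.symm))]
    simp [List.countP_cons, goodP, hg]

theorem count_stepB (l : List Char) (k : ℕ) :
    (if ((preC l (k + 1) : ℕ) : ℤ) = ((sufC l (k + 1) : ℕ) : ℤ)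
      then ((List.range k).countP (goodP l) : ℤ) + 1 else ((List.range k).countP (goodP l) : ℤ))
    = ((List.range (k + 1)).countP (goodP l) : ℤ) := by
  rw [List.range_succ, List.countP_append]
  by_cases hg : preC l (k + 1) = sufC l (k + 1)
  · rw [if_pos (by exact_mod_cast hg)]
    simp [List.countP_cons, goodP, hg]
  · rw [if_neg (by intro hcon; exact hg (by exact_mod_cast hcon))]
    simp [List.countP_cons, goodP, hg]

-- invariant of A's loop after processing indices 1 .. k-1
def InvA (l : List Char) (k : ℕ) : Prop :=
  ((PySem.List.pyRange 1 (k : Int) 1).foldl (stepA l) (initA l)).1.length = l.length ∧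
  PySem.List.pyGetD ((PySem.List.pyRange 1 (k : Int) 1).foldl (stepA l) (initA l)).1 ((k : Int) - 1) 0
      = (preC l k : Int) ∧
  ((PySem.List.pyRange 1 (k : Int) 1).foldl (stepA l) (initA l)).2.1 = (sufC l k : Int) ∧
  ((PySem.List.pyRange 1 (k : Int) 1).foldl (stepA l) (initA l)).2.2
      = ((List.range k).countP (goodP l) : Int)

theorem invA_base (l : List Char) (hl : l ≠ []) : InvA l 1 := by
  have h0 : 0 < l.length := List.length_pos_iff.mpr hl
  have hr : PySem.List.pyRange 1 ((1 : ℕ) : Int) 1 = [] := PySem.List.pyRange_one_eq_nil (by norm_num)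
  unfold InvA
  rw [hr]
  simp only [List.foldl_nil]
  have hc0 : PySem.List.pyGetD l 0 ' ' = l[0] := by
    rw [PySem.List.pyGetD_eq_getElem l ' ' (by norm_num) (by exact_mod_cast h0)]
    simp
  have hsl : PySem.List.slice l (some 1) none = l.drop 1 := by
    rw [PySem.List.slice_from_one]
    exact List.drop_one.symm
  have hd0 : sufC l 0 = l.toFinset.card := by simp [sufC]
  have hdecomp := sufC_at l 0 h0
  have hnums : (initA l).2.1 = (sufC l 1 : Int) := by
    have e2 : (initA l).2.1 =
        (if (PySem.List.slice l (some 1) none).contains (PySem.List.pyGetD l 0 ' ')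
          then ((PySem.Set.ofList l).length : ℤ) else ((PySem.Set.ofList l).length : ℤ) - 1) := rfl
    rw [e2, hsl, hc0, card_ofList, ← hd0, hdecomp]
    by_cases hm : l[0] ∈ l.drop 1
    · rw [if_pos ((contains_iff _ _).mpr hm), if_pos hm]
    · rw [if_neg (by simp only [contains_iff]; exact hm), if_neg hm]
      push_cast
      ring
  refine ⟨?_, ?_, hnums, ?_⟩
  · have e1 : (initA l).1 = PySem.List.pySetD (List.replicate l.length (1 : ℤ)) 0 1 := rfl
    rw [e1, PySem.List.length_pySetD, List.length_replicate]
  · have e1 : (initA l).1 = PySem.List.pySetD (List.replicate l.length (1 : ℤ)) 0 1 := rfl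
    rw [e1, show ((1 : ℕ) : ℤ) - 1 = (0 : ℤ) from by norm_num, preC_one l hl]
    have h := PySem.List.pyGetD_pySetD_natCast (List.replicate l.length (1 : ℤ)) 0 0 1 0
      (by simpa using h0)
    simpa using h
  · have e3 : (initA l).2.2 = (if (initA l).2.1 = 1 then (1 : ℤ) else 0) := rfl
    rw [e3, hnums]
    have hg : goodP l 0 = (1 == sufC l 1) := by
      simp [goodP, preC_one l hl]
    by_cases h1 : sufC l 1 = 1
    · rw [if_pos (by exact_mod_cast h1)]
      simp [List.range_succ, List.countP_cons, hg, h1]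
    · rw [if_neg (by intro hcon; exact h1 (by exact_mod_cast hcon))]
      have hbe : (1 == sufC l 1) = false := by
        simp [beq_iff_eq]
        omega
      simp [List.range_succ, List.countP_cons, hg, hbe]

theorem invA_step (l : List Char) (k : ℕ) (h1 : 1 ≤ k) (h2 : k + 1 ≤ l.length - 1)
    (ih : InvA l k) : InvA l (k + 1) := by
  have hkl : k < l.length := by omega
  unfold InvA at ih ⊢
  obtain ⟨ihlen, ihdp, ihnums, ihcount⟩ := ih
  set st := (PySem.List.pyRange 1 ((k : ℕ) : Int) 1).foldl (stepA l) (initA l) with hst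
  have hsplit : PySem.List.pyRange 1 (((k + 1 : ℕ)) : Int) 1
      = PySem.List.pyRange 1 ((k : ℕ) : Int) 1 ++ [((k : ℕ) : Int)] := by
    push_cast
    exact PySem.List.pyRange_one_succ_right (by omega)
  rw [hsplit, List.foldl_append, List.foldl_cons, List.foldl_nil]
  have hci : PySem.List.pyGetD l ((k : ℕ) : Int) ' ' = l[k] := by
    rw [PySem.List.pyGetD_eq_getElem l ' ' (by omega) (by exact_mod_cast hkl)]
    simp
  have hslice0 : PySem.List.slice l (some 0) (some ((k : ℕ) : Int)) = l.take k := by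
    rw [PySem.List.slice_zero_start, PySem.List.slice_to_natCast]
  have hslice1 : PySem.List.slice l (some (((k : ℕ) : Int) + 1)) none = l.drop (k + 1) := by
    rw [show (((k : ℕ) : Int) + 1) = (((k + 1 : ℕ) : ℕ) : Int) from by push_cast; ring,
      PySem.List.slice_from_natCast]
  have hdpi : (if (PySem.List.slice l (some 0) (some ((k : ℕ) : Int))).contains
        (PySem.List.pyGetD l ((k : ℕ) : Int) ' ') then
        PySem.List.pyGetD st.1 (((k : ℕ) : Int) - 1) 0
      else PySem.List.pyGetD st.1 (((k : ℕ) : Int) - 1) 0 + 1) = (preC l (k + 1) : Int) := by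
    rw [hslice0, hci, preC_succ l k hkl]
    by_cases hm : l[k] ∈ l.take k
    · rw [if_pos ((contains_iff _ _).mpr hm), if_pos hm, ihdp]
    · rw [if_neg (by simp only [contains_iff]; exact hm), if_neg hm, ihdp]
      push_cast
      ring
  have hnums' : (if ¬ (PySem.List.slice l (some (((k : ℕ) : Int) + 1)) none).contains
        (PySem.List.pyGetD l ((k : ℕ) : Int) ' ') then st.2.1 - 1 else st.2.1)
      = (sufC l (k + 1) : Int) := by
    rw [hslice1, hci, ihnums]
    have hrec := sufC_at l k hkl
    by_cases hm : l[k] ∈ l.drop (k + 1)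
    · rw [if_neg (by simp only [contains_iff, not_not]; exact hm), hrec, if_pos hm]
    · rw [if_pos (by simp only [contains_iff]; exact hm), hrec, if_neg hm]
      push_cast
      ring
  have hstep : stepA l st ((k : ℕ) : Int)
      = (PySem.List.pySetD st.1 ((k : ℕ) : Int) ((preC l (k + 1) : ℕ) : ℤ),
         ((sufC l (k + 1) : ℕ) : ℤ),
         ((List.range (k + 1)).countP (goodP l) : ℤ)) := by
    show (PySem.List.pySetD st.1 ((k : ℕ) : Int) _, _, _) = _
    rw [hdpi, hnums', ihcount, count_stepA l k]
  rw [hstep]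
  refine ⟨?_, ?_, rfl, rfl⟩
  · rw [PySem.List.length_pySetD]
    exact ihlen
  · rw [show (((k + 1 : ℕ)) : Int) - 1 = ((k : ℕ) : Int) from by push_cast; ring,
      PySem.List.pyGetD_pySetD_natCast _ k k _ 0 (by rw [ihlen]; exact hkl)]
    simp

theorem invA (l : List Char) (hl : l ≠ []) (k : ℕ) (h1 : 1 ≤ k)
    (h2 : k ≤ l.length - 1 ∨ k = 1) : InvA l k := by
  induction k, h1 using Nat.le_induction with
  | base => exact invA_base l hl
  | succ k hk ih =>
    have hk1 : k + 1 ≤ l.length - 1 := by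
      rcases h2 with h | h
      · exact h
      · omega
    exact invA_step l k hk hk1 (ih (by omega))

theorem splitsSpec_A (l : List Char) (h : l ≠ []) :
    numSplits (String.ofList l) = ((List.range (l.length - 1)).countP (goodP l) : Int) := by
  have hlen : 0 < l.length := List.length_pos_iff.mpr h
  have htl : (String.ofList l).toList = l := by simp
  simp only [numSplits, htl]
  by_cases hone : l.length = 1
  · rw [PySem.List.pyRange_one_eq_nil (by omega)]
    simp only [List.foldl_nil]
    have hinv := invA l h 1 le_rfl (Or.inr rfl)
    unfold InvA at hinv
    rw [PySem.List.pyRange_one_eq_nil (by norm_num)] at hinv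
    simp only [List.foldl_nil] at hinv
    rw [hinv.2.2.2]
    have hg : goodP l 0 = false := by
      have hp1 : preC l 1 = 1 := preC_one l h
      have hs1 : sufC l 1 = 0 := by
        have hnil : l.drop 1 = [] := by
          apply List.drop_eq_nil_of_le; omega
        simp [sufC, hnil]
      simp [goodP, hp1, hs1]
    rw [hone]
    simp [List.range_succ, List.countP_cons, hg]
  · have hinv := invA l h (l.length - 1) (by omega) (Or.inl le_rfl)
    unfold InvA at hinv
    rw [show ((l.length : Int) - 1) = ((l.length - 1 : ℕ) : Int) from by omega]
    exact hinv.2.2.2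

-- characterisation of B's backward pass
theorem bk_inv (l : List Char) (k : ℕ) (hk : k ≤ l.length) :
    ∀ (suf : List Int), suf.length = l.length + 1 →
    ((PySem.List.pyRange ((k : Int) - 1) (-1) (-1)).foldl (stepBk l)
       (PySem.Set.ofList ((l.drop k).reverse), suf)).2
    = (List.range (l.length + 1)).map (fun j => if j < k then (sufC l j : Int) else suf.getD j 0) := by
  induction k with
  | zero =>
    intro suf hs
    rw [PySem.List.pyRange_neg_one_eq_nil (by norm_num)]
    simp only [List.foldl_nil]
    rw [show (fun j => if j < 0 then (sufC l j : Int) else suf.getD j 0)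
        = (fun j => suf.getD j 0) from by funext j; simp, ← hs]
    exact (map_getD_range_self suf).symm
  | succ k ih =>
    intro suf hs
    have hkl : k < l.length := by omega
    have hcons : PySem.List.pyRange (((k + 1 : ℕ) : Int) - 1) (-1) (-1)
        = ((k : ℕ) : Int) :: PySem.List.pyRange (((k : ℕ) : Int) - 1) (-1) (-1) := by
      rw [show (((k + 1 : ℕ) : Int) - 1) = ((k : ℕ) : Int) from by push_cast; ring]
      exact PySem.List.pyRange_neg_one_cons (by omega)
    rw [hcons, List.foldl_cons]
    have hci : PySem.List.pyGetD l ((k : ℕ) : Int) ' ' = l[k] := by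
      rw [PySem.List.pyGetD_eq_getElem l ' ' (by omega) (by exact_mod_cast hkl)]
      simp
    have hseen : PySem.Set.add (PySem.Set.ofList ((l.drop (k + 1)).reverse)) l[k]
        = PySem.Set.ofList ((l.drop k).reverse) := (ofList_reverse_drop l k hkl).symm
    have hlen' : (PySem.Set.ofList ((l.drop k).reverse)).length = sufC l k := by
      rw [card_ofList, List.toFinset_reverse]
      rfl
    have hstep : stepBk l (PySem.Set.ofList ((l.drop (k + 1)).reverse), suf) ((k : ℕ) : Int)
        = (PySem.Set.ofList ((l.drop k).reverse), suf.set k ((sufC l k : ℕ) : ℤ)) := by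
      show (PySem.Set.add _ _, PySem.List.pySetD suf ((k : ℕ) : Int) _) = _
      rw [hci, hseen, hlen', PySem.List.pySetD_natCast]
    rw [hstep, ih (by omega) (suf.set k ((sufC l k : ℕ) : ℤ)) (by simp [hs])]
    apply List.map_congr_left
    intro j hj
    have hjlt : j < l.length + 1 := by simpa using List.mem_range.mp hj
    by_cases hjk : j < k
    · simp [hjk, show j < k + 1 from by omega]
    · by_cases hjek : j = k
      · subst hjek
        simp only [hjk, if_false, show j < j + 1 from by omega, if_true]
        rw [List.getD_eq_getElem?_getD, List.getElem?_set]
        simp [show j < suf.length from by omega]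
      · have hgt : ¬ j < k + 1 := by omega
        simp only [hjk, if_false, hgt]
        rw [List.getD_eq_getElem?_getD, List.getElem?_set]
        simp [Ne.symm hjek, List.getD_eq_getElem?_getD]

-- B's suf array holds the suffix distinct counts
theorem suf_eq (l : List Char) :
    ((PySem.List.pyRange ((l.length : Int) - 1) (-1) (-1)).foldl (stepBk l)
       (PySem.Set.empty, List.replicate (l.length + 1) (0 : Int))).2
    = (List.range (l.length + 1)).map (fun j => (sufC l j : Int)) := by
  have hinit : (PySem.Set.empty : PySem.Set Char) = PySem.Set.ofList ((l.drop l.length).reverse) := by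
    rw [List.drop_length]
    rfl
  rw [hinit, bk_inv l l.length le_rfl _ (by simp)]
  apply List.map_congr_left
  intro j hj
  have hjlt : j < l.length + 1 := by simpa using List.mem_range.mp hj
  by_cases hjk : j < l.length
  · simp [hjk]
  · have hje : j = l.length := by omega
    subst hje
    simp [sufC_len]

-- invariant of B's forward loop
theorem fw_inv (l : List Char) (k : ℕ) (hk : k ≤ l.length - 1) (hl : l ≠ []) :
    (PySem.List.pyRange 0 ((k : ℕ) : Int) 1).foldl
        (stepFw l ((List.range (l.length + 1)).map (fun j => (sufC l j : Int)))) (PySem.Set.empty, 0)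
    = (PySem.Set.ofList (l.take k), ((List.range k).countP (goodP l) : Int)) := by
  induction k with
  | zero =>
    rw [PySem.List.pyRange_one_eq_nil (by norm_num)]
    simp only [List.foldl_nil, List.take_zero]
    rfl
  | succ k ih =>
    have hkl : k < l.length := by omega
    have hsplit : PySem.List.pyRange 0 ((k + 1 : ℕ) : Int) 1
        = PySem.List.pyRange 0 ((k : ℕ) : Int) 1 ++ [((k : ℕ) : Int)] := by
      push_cast
      exact PySem.List.pyRange_one_succ_right (by omega)
    rw [hsplit, List.foldl_append, ih (by omega), List.foldl_cons, List.foldl_nil]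
    have hci : PySem.List.pyGetD l ((k : ℕ) : Int) ' ' = l[k] := by
      rw [PySem.List.pyGetD_eq_getElem l ' ' (by omega) (by exact_mod_cast hkl)]
      simp
    have hseen : PySem.Set.add (PySem.Set.ofList (l.take k)) l[k]
        = PySem.Set.ofList (l.take (k + 1)) := by
      rw [List.take_succ_eq_append_getElem hkl, ofList_concat]
    have hlen' : (PySem.Set.ofList (l.take (k + 1))).length = preC l (k + 1) := by
      rw [card_ofList]
      rfl
    have hsuf : PySem.List.pyGetD ((List.range (l.length + 1)).map (fun j => (sufC l j : Int)))
        (((k : ℕ) : Int) + 1) 0 = (sufC l (k + 1) : Int) := by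
      rw [show (((k : ℕ) : Int) + 1) = (((k + 1 : ℕ) : ℕ) : Int) from by push_cast; ring,
        PySem.List.pyGetD_natCast, PySem.List.getD_map_range _ _ _ _ (by omega)]
    have hstep : stepFw l ((List.range (l.length + 1)).map (fun j => (sufC l j : Int)))
          (PySem.Set.ofList (l.take k), ((List.range k).countP (goodP l) : Int)) ((k : ℕ) : Int)
        = (PySem.Set.ofList (l.take (k + 1)), ((List.range (k + 1)).countP (goodP l) : Int)) := by
      show (PySem.Set.add _ _, if _ then _ else _) = _
      rw [hci, hseen, hlen', hsuf, count_stepB l k]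
    rw [hstep]

theorem splitsSpec_B (l : List Char) :
    numSplits_alt (String.ofList l) = ((List.range (l.length - 1)).countP (goodP l) : Int) := by
  have htl : (String.ofList l).toList = l := by simp
  simp only [numSplits_alt, htl]
  by_cases hl : l = []
  · subst hl
    simp only [List.length_nil]
    rw [PySem.List.pyRange_one_eq_nil (by norm_num)]
    simp
  · have hlen : 0 < l.length := List.length_pos_iff.mpr hl
    rw [suf_eq l, show ((l.length : Int) - 1) = ((l.length - 1 : ℕ) : Int) from by omega,
      fw_inv l (l.length - 1) le_rfl hl]

-- ===== VERDICT (by name: the statement is the Claim_ definition above) =====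
theorem numSplits_spec : Claim_equal_numSplits := by
  intro s _ hpre
  unfold Spec_numSplits
  have hs : s = String.ofList s.toList := String.ofList_toList.symm
  rw [hs, splitsSpec_A s.toList hpre, splitsSpec_B s.toList]
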